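-- pv_equiv track=rewrite | github.com/wontothree/game-and-ai | grid-based-path-search/map_processing.py | inflate_walls
-- ===== SOURCE A (Python) =====
-- def inflate_walls(map_str):
--     lines = map_str.strip("\n").split("\n")
--     h, w = len(lines), len(lines[0])
--
--     grid = [list(row) for row in lines]
--     new_grid = [row[:] for row in grid]  # deepcopy
--
--     # 8방향 + 자기 자신
--     directions = [(-1,-1), (-1,0), (-1,1),
--                 (0,-1),  (0,0),  (0,1),
--                 (1,-1),  (1,0),  (1,1)]
--
--     for y in range(h):
--         for x in range(w):
--             if grid[y][x] == "#" or grid[y][x] == 'X':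
--                 for dy, dx in directions:
--                     ny, nx = y + dy, x + dx
--                     if 0 <= ny < h and 0 <= nx < w:
--                         # 빈 칸만 채우기 (다른 문자 보호)
--                         if new_grid[ny][nx] == ".":
--                             new_grid[ny][nx] = "~"
--
--     return "\n".join("".join(row) for row in new_grid)
-- ===== SOURCE B (Python) =====
-- def inflate_walls(map_str):
--     lines = map_str.strip("\n").split("\n")
--     h, w = len(lines), len(lines[0])
--
--     def wall_near(y, x):
--         # scan the 3x3 window around (y, x) in the ORIGINAL grid
--         return any(
--             0 <= y + dy < h and 0 <= x + dx < w and lines[y + dy][x + dx] in "#X"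
--             for dy in (-1, 0, 1) for dx in (-1, 0, 1)
--         )
--
--     rows = []
--     for y in range(h):
--         row = lines[y]
--         new_row = "".join(
--             "~" if row[x] == "." and wall_near(y, x) else row[x]
--             for x in range(w)
--         )
--         rows.append(new_row + row[w:])
--     return "\n".join(rows)
-- ===== Notes on version B (the rewrite author's own statement) =====
-- stated objective: alternative
-- what changed: A scatters: for each wall cell it mutates the empty cells of its 3x3 window in a copied grid; B gathers: it builds the output directly, each empty cell scanning its own 3x3 window of the original grid for a wall, with no mutable grid at all.
import Mathlib
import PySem

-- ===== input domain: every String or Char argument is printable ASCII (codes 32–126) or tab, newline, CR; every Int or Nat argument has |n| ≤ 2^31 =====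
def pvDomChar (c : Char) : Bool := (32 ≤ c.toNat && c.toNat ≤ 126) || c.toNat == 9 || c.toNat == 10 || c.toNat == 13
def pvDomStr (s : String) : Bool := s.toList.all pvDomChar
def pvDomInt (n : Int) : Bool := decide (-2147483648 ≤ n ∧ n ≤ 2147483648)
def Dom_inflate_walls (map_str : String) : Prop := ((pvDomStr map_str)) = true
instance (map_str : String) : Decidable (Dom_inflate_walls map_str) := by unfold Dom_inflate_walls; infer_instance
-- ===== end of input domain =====

-- B replaces A's mutating scatter pass (mark the 3x3 window around every wall) by a pure
-- gather pass (each '.' cell scans its own 3x3 window for a wall); objective: alternative.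

-- ===== PORT A =====
def pvLines (map_str : String) : List (List Char) :=
  PySem.Chars.splitOn (PySem.Chars.stripChars map_str.toList ['\n']) ['\n']

def pvWall (c : Char) : Bool := c == '#' || c == 'X'

def pvDirs : List (Int × Int) :=
  [(-1,-1), (-1,0), (-1,1), (0,-1), (0,0), (0,1), (1,-1), (1,0), (1,1)]

-- one direction of A's inner scatter loop: mark new_grid[ny][nx] if in bounds and '.'
def pvStep (h w : Nat) (y x : Nat) (g : List (List Char)) (d : Int × Int) : List (List Char) :=
  -- ny = y + dy, nx = x + dx
  if 0 ≤ (y : Int) + d.1 ∧ (y : Int) + d.1 < (h : Int) ∧ 0 ≤ (x : Int) + d.2 ∧ (x : Int) + d.2 < (w : Int) then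
    if (g.getD ((y : Int) + d.1).toNat []).getD ((x : Int) + d.2).toNat ' ' == '.' then
      g.modify ((y : Int) + d.1).toNat (fun row => row.set ((x : Int) + d.2).toNat '~')
    else g
  else g

def inflate_walls (map_str : String) : String :=
  let lines := pvLines map_str
  let h := lines.length
  let w := (lines.getD 0 []).length
  -- grid = lines as char lists; new_grid starts as a copy (grid[y][x] is a guarded read:
  -- getD's default is only reached outside Pre_, where Python raises IndexError)
  let grid := lines
  let final := (List.range h).foldl (fun g y =>
    (List.range w).foldl (fun g x =>
      if pvWall ((grid.getD y []).getD x ' ') then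
        pvDirs.foldl (pvStep h w y x) g
      else g) g) grid
  String.ofList (PySem.Chars.join ['\n'] final)

-- ===== PORT B =====
-- B's wall_near: any wall in the in-bounds part of the 3x3 window around (y, x) in the ORIGINAL grid
def pvWallNear (lines : List (List Char)) (h w : Nat) (y x : Nat) : Bool :=
  [(-1 : Int), 0, 1].any fun dy => [(-1 : Int), 0, 1].any fun dx =>
    let ny : Int := (y : Int) + dy
    let nx : Int := (x : Int) + dx
    decide (0 ≤ ny ∧ ny < (h : Int) ∧ 0 ≤ nx ∧ nx < (w : Int)) &&
      ((lines.getD ny.toNat []).getD nx.toNat ' ') ∈ ['#', 'X']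

def inflate_walls_alt (map_str : String) : String :=
  let lines := pvLines map_str
  let h := lines.length
  let w := (lines.getD 0 []).length
  let rows := (List.range h).map (fun y =>
    let row := lines.getD y []
    ((List.range w).map (fun x =>
      let c := row.getD x ' '
      if c == '.' && pvWallNear lines h w y x then '~' else c))
      ++ row.drop w)
  String.ofList (PySem.Chars.join ['\n'] rows)

-- ===== PRECONDITION & SPEC =====
-- Pre_ excludes exactly the ragged maps on which Python A raises IndexError: some line is
-- shorter than the first line (whose length A uses as the width for every row).
def Pre_inflate_walls (map_str : String) : Prop :=
  ∀ l ∈ pvLines map_str, ((pvLines map_str).getD 0 []).length ≤ l.length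
instance (map_str : String) : Decidable (Pre_inflate_walls map_str) := by
  unfold Pre_inflate_walls; infer_instance

def pvWitness_inflate_walls : String := "#..\n...\n..X"

def Spec_inflate_walls (map_str : String) (out : String) : Prop := out = inflate_walls_alt map_str
instance (map_str : String) (out : String) : Decidable (Spec_inflate_walls map_str out) := by
  unfold Spec_inflate_walls; infer_instance

-- ===== CLAIM (what is proved, stated in full; the proofs are below) =====
def Claim_equal_inflate_walls : Prop := ∀ (map_str : String), Dom_inflate_walls map_str → Pre_inflate_walls map_str → Spec_inflate_walls map_str (inflate_walls map_str)

-- ===== LEMMAS AND PROOFS =====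

-- lookup of cell (j, i) of a grid, with the (unreachable under Pre_) defaults of the ports
def pvLk (g : List (List Char)) (j i : Nat) : Char := (g.getD j []).getD i ' '

-- grids of identical shape
def pvShape (g g' : List (List Char)) : Prop :=
  g.length = g'.length ∧ ∀ j, (g.getD j []).length = (g'.getD j []).length

theorem pvShape_refl (g : List (List Char)) : pvShape g g := ⟨rfl, fun _ => rfl⟩

theorem pvShape_trans {a b c : List (List Char)} (h1 : pvShape a b) (h2 : pvShape b c) :
    pvShape a c := ⟨h1.1.trans h2.1, fun j => (h1.2 j).trans (h2.2 j)⟩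

theorem pvGetD_modify_set (g : List (List Char)) (n m : Nat) (c : Char) (j : Nat) :
    (g.modify n (fun row => row.set m c)).getD j [] =
      if n = j ∧ j < g.length then (g.getD j []).set m c else g.getD j [] := by
  simp only [List.getD, List.getElem?_modify]
  rcases Nat.lt_or_ge j g.length with hj | hj
  · rw [List.getElem?_eq_getElem hj]
    simp only [Option.map_eq_map, Option.map_some, Option.getD_some, hj, and_true]
  · rw [List.getElem?_eq_none_iff.mpr hj]
    have hn : ¬ (n = j ∧ j < g.length) := by omega
    simp [hn]

theorem pvStep_shape (h w y x : Nat) (g : List (List Char)) (d : Int × Int) :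
    pvShape (pvStep h w y x g d) g := by
  unfold pvStep pvShape
  split_ifs with h1 h2
  · refine ⟨by simp, fun j => ?_⟩
    rw [pvGetD_modify_set]
    split <;> simp
  · exact ⟨rfl, fun _ => rfl⟩
  · exact ⟨rfl, fun _ => rfl⟩

theorem pvGetD_set (row : List Char) (m : Nat) (c : Char) (i : Nat) :
    (row.set m c).getD i ' ' = if m = i ∧ i < row.length then c else row.getD i ' ' := by
  simp only [List.getD, List.getElem?_set]
  rcases Nat.lt_or_ge i row.length with hi | hi
  · by_cases hm : m = i
    · simp [hm, hi]
    · simp [hm]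
  · have hn : ¬ (m = i ∧ i < row.length) := by omega
    rw [List.getElem?_eq_none_iff.mpr hi, if_neg hn]
    by_cases hm : m = i
    · simp [hm, Nat.not_lt.mpr hi]
    · simp [hm]

theorem pvStep_lk (h w y x : Nat) (g : List (List Char)) (d : Int × Int)
    (Hl : g.length = h) (Hs : ∀ j, j < h → w ≤ (g.getD j []).length) (j i : Nat) :
    pvLk (pvStep h w y x g d) j i =
      if (y : Int) + d.1 = (j : Int) ∧ (x : Int) + d.2 = (i : Int) ∧ j < h ∧ i < w ∧ pvLk g j i = '.'
      then '~' else pvLk g j i := by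
  unfold pvStep
  by_cases hb : 0 ≤ (y : Int) + d.1 ∧ (y : Int) + d.1 < (h : Int) ∧ 0 ≤ (x : Int) + d.2 ∧ (x : Int) + d.2 < (w : Int)
  · rw [if_pos hb]
    by_cases hdot : ((g.getD ((y : Int) + d.1).toNat []).getD ((x : Int) + d.2).toNat ' ' == '.') = true
    · rw [if_pos hdot]
      unfold pvLk
      rw [pvGetD_modify_set]
      by_cases hj : ((y : Int) + d.1).toNat = j ∧ j < g.length
      · rw [if_pos hj, pvGetD_set]
        by_cases hi : ((x : Int) + d.2).toNat = i ∧ i < (g.getD j []).length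
        · rw [if_pos hi, if_pos ?_]
          refine ⟨by omega, by omega, by omega, by omega, ?_⟩
          have := beq_iff_eq.mp hdot
          rwa [hj.1, hi.1] at this
        · rw [if_neg hi, if_neg ?_]
          rintro ⟨h1, h2, h3, h4, h5⟩
          exact hi ⟨by omega, lt_of_lt_of_le h4 (Hs j (by omega))⟩
      · rw [if_neg hj, if_neg ?_]
        rintro ⟨h1, h2, h3, h4, h5⟩
        exact hj ⟨by omega, by omega⟩
    · rw [if_neg hdot, if_neg ?_]
      rintro ⟨h1, h2, h3, h4, h5⟩
      apply hdot
      have e1 : ((y : Int) + d.1).toNat = j := by omega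
      have e2 : ((x : Int) + d.2).toNat = i := by omega
      rw [e1, e2, beq_iff_eq]
      exact h5
  · rw [if_neg hb, if_neg ?_]
    rintro ⟨h1, h2, h3, h4, h5⟩
    exact hb ⟨by omega, by omega, by omega, by omega⟩

theorem pvDirsFold_shape (h w y x : Nat) (ds : List (Int × Int)) (g : List (List Char)) :
    pvShape (ds.foldl (pvStep h w y x) g) g := by
  induction ds generalizing g with
  | nil => exact pvShape_refl g
  | cons d ds ih => exact pvShape_trans (ih (pvStep h w y x g d)) (pvStep_shape h w y x g d)

theorem pvDirsFold_lk (h w y x : Nat) (ds : List (Int × Int)) (g : List (List Char))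
    (Hl : g.length = h) (Hs : ∀ j, j < h → w ≤ (g.getD j []).length) (j i : Nat) :
    pvLk (ds.foldl (pvStep h w y x) g) j i =
      if (∃ d ∈ ds, (y : Int) + d.1 = (j : Int) ∧ (x : Int) + d.2 = (i : Int)) ∧
          j < h ∧ i < w ∧ pvLk g j i = '.'
      then '~' else pvLk g j i := by
  induction ds generalizing g with
  | nil => simp
  | cons d ds ih =>
    rw [List.foldl_cons]
    have hshape := pvStep_shape h w y x g d
    have Hl' : (pvStep h w y x g d).length = h := hshape.1.trans Hl
    have Hs' : ∀ j, j < h → w ≤ ((pvStep h w y x g d).getD j []).length :=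
      fun j hj => (hshape.2 j) ▸ Hs j hj
    rw [ih (pvStep h w y x g d) Hl' Hs']
    have hst := pvStep_lk h w y x g d Hl Hs j i
    by_cases hd : (y : Int) + d.1 = (j : Int) ∧ (x : Int) + d.2 = (i : Int) ∧ j < h ∧ i < w ∧ pvLk g j i = '.'
    · rw [if_pos hd] at hst
      rw [hst, if_neg (by rintro ⟨-, -, -, hdot⟩; exact absurd hdot (by decide)),
        if_pos ⟨⟨d, List.mem_cons_self, hd.1, hd.2.1⟩, hd.2.2⟩]
    · rw [if_neg hd] at hst
      rw [hst]
      refine if_congr ?_ rfl rfl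
      constructor
      · rintro ⟨⟨d', hd', he⟩, hc⟩
        exact ⟨⟨d', List.mem_cons_of_mem d hd', he⟩, hc⟩
      · rintro ⟨⟨d', hd', he⟩, hc⟩
        rcases List.mem_cons.mp hd' with rfl | hmem
        · exact absurd ⟨he.1, he.2, hc⟩ hd
        · exact ⟨⟨d', hmem, he⟩, hc⟩

-- adjacency of two cells (3x3 window)
def pvAdj (y x j i : Nat) : Bool := decide (y ≤ j + 1 ∧ j ≤ y + 1 ∧ x ≤ i + 1 ∧ i ≤ x + 1)

theorem pvDirs_exists_iff (y x j i : Nat) :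
    (∃ d ∈ pvDirs, (y : Int) + d.1 = (j : Int) ∧ (x : Int) + d.2 = (i : Int)) ↔ pvAdj y x j i = true := by
  simp only [pvDirs, pvAdj, List.mem_cons, List.not_mem_nil, or_false, decide_eq_true_eq]
  constructor
  · rintro ⟨d, hd, h1, h2⟩
    rcases hd with rfl | rfl | rfl | rfl | rfl | rfl | rfl | rfl | rfl <;> omega
  · rintro ⟨a1, a2, a3, a4⟩
    have hy : (j : Int) - y = -1 ∨ (j : Int) - y = 0 ∨ (j : Int) - y = 1 := by omega
    have hx : (i : Int) - x = -1 ∨ (i : Int) - x = 0 ∨ (i : Int) - x = 1 := by omega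
    rcases hy with hy | hy | hy <;> rcases hx with hx | hx | hx
    · exact ⟨(-1, -1), by simp, by omega, by omega⟩
    · exact ⟨(-1, 0), by simp, by omega, by omega⟩
    · exact ⟨(-1, 1), by simp, by omega, by omega⟩
    · exact ⟨(0, -1), by simp, by omega, by omega⟩
    · exact ⟨(0, 0), by simp, by omega, by omega⟩
    · exact ⟨(0, 1), by simp, by omega, by omega⟩
    · exact ⟨(1, -1), by simp, by omega, by omega⟩
    · exact ⟨(1, 0), by simp, by omega, by omega⟩
    · exact ⟨(1, 1), by simp, by omega, by omega⟩

-- the outer double loop of A, over an explicit list of source cells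
def pvOuterStep (lines : List (List Char)) (h w : Nat) (g : List (List Char)) (p : Nat × Nat) :
    List (List Char) :=
  if pvWall ((lines.getD p.1 []).getD p.2 ' ') then pvDirs.foldl (pvStep h w p.1 p.2) g else g

theorem pvOuterFold_shape (lines : List (List Char)) (h w : Nat) (P : List (Nat × Nat))
    (g : List (List Char)) : pvShape (P.foldl (pvOuterStep lines h w) g) g := by
  induction P generalizing g with
  | nil => exact pvShape_refl g
  | cons p P ih =>
    refine pvShape_trans (ih _) ?_
    unfold pvOuterStep
    split
    · exact pvDirsFold_shape h w p.1 p.2 pvDirs g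
    · exact pvShape_refl g

theorem pvOuterFold_lk (lines : List (List Char)) (h w : Nat) (P : List (Nat × Nat))
    (g : List (List Char)) (Hl : g.length = h) (Hs : ∀ j, j < h → w ≤ (g.getD j []).length)
    (j i : Nat) :
    pvLk (P.foldl (pvOuterStep lines h w) g) j i =
      if (∃ p ∈ P, pvWall (pvLk lines p.1 p.2) = true ∧ pvAdj p.1 p.2 j i = true) ∧
          j < h ∧ i < w ∧ pvLk g j i = '.'
      then '~' else pvLk g j i := by
  induction P generalizing g with
  | nil => simp
  | cons p P ih =>
    rw [List.foldl_cons]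
    have hshape : pvShape (pvOuterStep lines h w g p) g := by
      unfold pvOuterStep
      split
      · exact pvDirsFold_shape h w p.1 p.2 pvDirs g
      · exact pvShape_refl g
    have Hl' : (pvOuterStep lines h w g p).length = h := hshape.1.trans Hl
    have Hs' : ∀ j, j < h → w ≤ ((pvOuterStep lines h w g p).getD j []).length :=
      fun j hj => (hshape.2 j) ▸ Hs j hj
    rw [ih (pvOuterStep lines h w g p) Hl' Hs']
    by_cases hwall : pvWall ((lines.getD p.1 []).getD p.2 ' ') = true
    · have hg' : pvOuterStep lines h w g p = pvDirs.foldl (pvStep h w p.1 p.2) g := by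
        unfold pvOuterStep; rw [if_pos hwall]
      have hst : pvLk (pvOuterStep lines h w g p) j i =
          if pvAdj p.1 p.2 j i = true ∧ j < h ∧ i < w ∧ pvLk g j i = '.' then '~' else pvLk g j i := by
        rw [hg', pvDirsFold_lk h w p.1 p.2 pvDirs g Hl Hs j i]
        exact if_congr (and_congr_left' (pvDirs_exists_iff p.1 p.2 j i)) rfl rfl
      rw [hst]
      by_cases hd : pvAdj p.1 p.2 j i = true ∧ j < h ∧ i < w ∧ pvLk g j i = '.'
      · rw [if_pos hd,
          if_neg (by rintro ⟨-, -, -, hdot⟩; exact absurd hdot (by decide)),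
          if_pos ⟨⟨p, List.mem_cons_self, hwall, hd.1⟩, hd.2⟩]
      · rw [if_neg hd]
        refine if_congr ?_ rfl rfl
        constructor
        · rintro ⟨⟨q, hq, hw', ha⟩, hc⟩
          exact ⟨⟨q, List.mem_cons_of_mem p hq, hw', ha⟩, hc⟩
        · rintro ⟨⟨q, hq, hw', ha⟩, hc⟩
          rcases List.mem_cons.mp hq with rfl | hmem
          · exact absurd ⟨ha, hc⟩ hd
          · exact ⟨⟨q, hmem, hw', ha⟩, hc⟩
    · have hg' : pvOuterStep lines h w g p = g := by
        unfold pvOuterStep; rw [if_neg hwall]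
      rw [hg']
      refine if_congr ?_ rfl rfl
      constructor
      · rintro ⟨⟨q, hq, hw', ha⟩, hc⟩
        exact ⟨⟨q, List.mem_cons_of_mem p hq, hw', ha⟩, hc⟩
      · rintro ⟨⟨q, hq, hw', ha⟩, hc⟩
        rcases List.mem_cons.mp hq with rfl | hmem
        · exact absurd hw' (by unfold pvLk at *; exact hwall)
        · exact ⟨⟨q, hmem, hw', ha⟩, hc⟩

theorem pvWallNear_iff (lines : List (List Char)) (h w y x : Nat) :
    pvWallNear lines h w y x = true ↔
      ∃ p : Nat × Nat, p.1 < h ∧ p.2 < w ∧ pvWall (pvLk lines p.1 p.2) = true ∧ pvAdj p.1 p.2 y x = true := by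
  unfold pvWallNear
  simp only [List.any_eq_true, Bool.and_eq_true, decide_eq_true_eq, List.mem_cons,
    List.not_mem_nil, or_false]
  constructor
  · rintro ⟨dy, hdy, dx, hdx, ⟨b1, b2, b3, b4⟩, hwchar⟩
    refine ⟨(((y : Int) + dy).toNat, ((x : Int) + dx).toNat), by omega, by omega, ?_, ?_⟩
    · unfold pvLk pvWall
      rw [Bool.or_eq_true, beq_iff_eq, beq_iff_eq]
      simpa only [List.getD] using hwchar
    · unfold pvAdj
      rcases hdy with rfl | rfl | rfl <;> rcases hdx with rfl | rfl | rfl <;>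
        simp only [decide_eq_true_eq] <;> omega
  · rintro ⟨⟨py, px⟩, hy, hx, hwall, hadj⟩
    unfold pvAdj at hadj
    simp only [decide_eq_true_eq] at hadj
    refine ⟨(py : Int) - y, by omega, (px : Int) - x, by omega, ⟨by omega, by omega, by omega, by omega⟩, ?_⟩
    have e1 : ((y : Int) + ((py : Int) - y)).toNat = py := by omega
    have e2 : ((x : Int) + ((px : Int) - x)).toNat = px := by omega
    rw [e1, e2]
    unfold pvWall pvLk at hwall
    simp only [Bool.or_eq_true, beq_iff_eq] at hwall
    simpa only [List.getD] using hwall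

-- the source-cell list of A's double loop, row-major
def pvCells (H W : Nat) : List (Nat × Nat) :=
  (List.range H).flatMap fun y => (List.range W).map fun x => (y, x)

theorem pvMem_cells (H W : Nat) (p : Nat × Nat) : p ∈ pvCells H W ↔ p.1 < H ∧ p.2 < W := by
  unfold pvCells
  simp only [List.mem_flatMap, List.mem_map, List.mem_range]
  constructor
  · rintro ⟨y, hy, x, hx, rfl⟩
    exact ⟨hy, hx⟩
  · rintro ⟨h1, h2⟩
    exact ⟨p.1, h1, p.2, h2, rfl⟩

theorem pvGrids_eq (L : List (List Char))
    (Hs : ∀ j, j < L.length → (L.getD 0 []).length ≤ (L.getD j []).length) :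
    (List.range L.length).foldl (fun g y =>
      (List.range (L.getD 0 []).length).foldl (fun g x =>
        if pvWall ((L.getD y []).getD x ' ') then
          pvDirs.foldl (pvStep L.length (L.getD 0 []).length y x) g
        else g) g) L
    = (List.range L.length).map (fun y =>
        ((List.range (L.getD 0 []).length).map (fun x =>
          if ((L.getD y []).getD x ' ' == '.') && pvWallNear L L.length (L.getD 0 []).length y x
          then '~' else (L.getD y []).getD x ' ')) ++ (L.getD y []).drop (L.getD 0 []).length) := by
  set H := L.length with hH
  set W := (L.getD 0 []).length with hW
  have hfold : (List.range H).foldl (fun g y =>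
      (List.range W).foldl (fun g x =>
        if pvWall ((L.getD y []).getD x ' ') then pvDirs.foldl (pvStep H W y x) g else g) g) L
      = (pvCells H W).foldl (pvOuterStep L H W) L := by
    unfold pvCells
    rw [List.foldl_flatMap]
    simp only [List.foldl_map, pvOuterStep]
  rw [hfold]
  have hlen : ((pvCells H W).foldl (pvOuterStep L H W) L).length = H :=
    (pvOuterFold_shape L H W (pvCells H W) L).1
  have hrowlen : ∀ j, (((pvCells H W).foldl (pvOuterStep L H W) L).getD j []).length =
      (L.getD j []).length := (pvOuterFold_shape L H W (pvCells H W) L).2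
  have hlk := pvOuterFold_lk L H W (pvCells H W) L rfl Hs
  apply List.ext_getElem
  · rw [hlen]; simp
  · intro j hj1 hj2
    have hjH : j < H := by rwa [hlen] at hj1
    rw [List.getElem_map, List.getElem_range]
    apply List.ext_getElem
    · rw [show ((pvCells H W).foldl (pvOuterStep L H W) L)[j] =
          (((pvCells H W).foldl (pvOuterStep L H W) L).getD j []) from
          (List.getD_eq_getElem _ [] hj1).symm]
      rw [hrowlen j]
      simp only [List.length_append, List.length_map, List.length_range, List.length_drop]
      have := Hs j hjH
      omega
    · intro i hi1 hi2
      have hilen : i < (L.getD j []).length := by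
        have h1 := hrowlen j
        have h2 : (((pvCells H W).foldl (pvOuterStep L H W) L).getD j []).length =
            (((pvCells H W).foldl (pvOuterStep L H W) L))[j].length := by
          rw [List.getD_eq_getElem _ [] hj1]
        omega
      have hchar : (((pvCells H W).foldl (pvOuterStep L H W) L))[j][i] =
          pvLk ((pvCells H W).foldl (pvOuterStep L H W) L) j i := by
        unfold pvLk
        rw [List.getD_eq_getElem _ [] hj1,
          List.getD_eq_getElem _ ' ' (show i < _ from hi1)]
      refine hchar.trans ?_
      rw [hlk j i]
      by_cases hiW : i < W
      · rw [List.getElem_append_left (by simp only [List.length_map, List.length_range]; exact hiW),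
          List.getElem_map, List.getElem_range]
        by_cases hdot : pvLk L j i = '.'
        · by_cases hnear : pvWallNear L H W j i = true
          · obtain ⟨p, hp1, hp2, hpw, hpa⟩ := (pvWallNear_iff L H W j i).mp hnear
            rw [if_pos ⟨⟨p, (pvMem_cells H W p).mpr ⟨hp1, hp2⟩, hpw, hpa⟩, hjH, hiW, hdot⟩,
              if_pos (by rw [Bool.and_eq_true]; exact ⟨beq_iff_eq.mpr hdot, hnear⟩)]
          · rw [if_neg (by
                rintro ⟨⟨p, hpmem, hpw, hpa⟩, -⟩
                obtain ⟨hq1, hq2⟩ := (pvMem_cells H W p).mp hpmem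
                exact hnear ((pvWallNear_iff L H W j i).mpr ⟨p, hq1, hq2, hpw, hpa⟩)),
              if_neg (by rw [Bool.and_eq_true]; rintro ⟨-, hb⟩; exact hnear hb)]
            rfl
        · rw [if_neg (by rintro ⟨-, -, -, hd⟩; exact hdot hd),
            if_neg (by rw [Bool.and_eq_true]; rintro ⟨hb, -⟩; exact hdot (beq_iff_eq.mp hb))]
          rfl
      · rw [if_neg (by rintro ⟨-, -, hiW', -⟩; exact hiW hiW')]
        rw [List.getElem_append_right (by simp only [List.length_map, List.length_range]; omega)]
        simp only [List.length_map, List.length_range]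
        have hmi : W + (i - W) = i := by omega
        have hm : i - W < ((L.getD j []).drop W).length := by
          simp only [List.length_drop]; omega
        refine Eq.symm ?_
        calc ((L.getD j []).drop W)[i - W]'hm = (L.getD j [])[W + (i - W)]'(by omega) :=
              List.getElem_drop
          _ = pvLk L j i := by
              unfold pvLk
              rw [List.getD_eq_getElem _ ' ' hilen]
              congr 1

-- ===== VERDICT (by name: the statement is the Claim_ definition above) =====
theorem inflate_walls_spec : Claim_equal_inflate_walls := by
  intro map_str _ hpre
  unfold Spec_inflate_walls inflate_walls inflate_walls_alt
  have Hs : ∀ j, j < (pvLines map_str).length →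
      ((pvLines map_str).getD 0 []).length ≤ ((pvLines map_str).getD j []).length := by
    intro j hj
    have := hpre _ (List.getElem_mem hj)
    rwa [List.getD_eq_getElem _ [] hj]
  exact congrArg (fun t => String.ofList (PySem.Chars.join ['\n'] t)) (pvGrids_eq (pvLines map_str) Hs)
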